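-- pv_equiv track=rewrite | github.com/12345gitby/Al-Practicals | mari.py | calculate_calories_and_coins
-- ===== SOURCE A (Python) =====
-- def calculate_calories_and_coins(screen):
--     M, N = len(screen), len(screen[0])
--     coins = 0
--     calories = 0
--
--     for col in range(N):
--         max_coin_height = -1
--         ring_hurdle_height = -1
--         jump_height = 0
--
--         for row in range(M):
--             if screen[row][col] == 'C':
--                 max_coin_height = max(max_coin_height, row)
--             elif screen[row][col] == 'H':
--                 if ring_hurdle_height == -1:
--                     ring_hurdle_height = row
--                 else:
--                     jump_height = max(jump_height, row - ring_hurdle_height - 1)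
--                     ring_hurdle_height = row
--
--         coins += max_coin_height + 1
--         calories += 2 * jump_height
--
--     return coins, calories
-- ===== SOURCE B (Python) =====
-- def step(x, st):
--     sc, cnt, sh, run, best = st
--     sc = sc or x == 'C'
--     cnt = cnt + sc
--     if x == 'H':
--         return (sc, cnt, True, 0, max(best, run) if sh else best)
--     return (sc, cnt, sh, run + 1, best)
--
--
-- def calculate_calories_and_coins(screen):
--     states = [(False, 0, False, 0, 0)] * len(screen[0])
--     for row in reversed(screen):
--         states = [step(x, st) for x, st in zip(row, states)]
--     coins = sum(st[1] for st in states)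
--     calories = 2 * sum(st[4] for st in states)
--     return coins, calories
-- ===== Notes on version B (the rewrite author's own statement) =====
-- stated objective: alternative
-- what changed: Replaces A's top-down column-by-column scan with index arithmetic (running max of C row indices, hurdle-row sentinel -1, gaps as row-index differences) by a single bottom-up row-major sweep over reversed(screen) carrying per-column state tuples: coins are obtained by counting (each processed row increments a column's counter iff a C has been seen at or below it) and jumps by run-length counters of consecutive non-H cells closed at each H, so no row index is ever used.
import Mathlib
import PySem

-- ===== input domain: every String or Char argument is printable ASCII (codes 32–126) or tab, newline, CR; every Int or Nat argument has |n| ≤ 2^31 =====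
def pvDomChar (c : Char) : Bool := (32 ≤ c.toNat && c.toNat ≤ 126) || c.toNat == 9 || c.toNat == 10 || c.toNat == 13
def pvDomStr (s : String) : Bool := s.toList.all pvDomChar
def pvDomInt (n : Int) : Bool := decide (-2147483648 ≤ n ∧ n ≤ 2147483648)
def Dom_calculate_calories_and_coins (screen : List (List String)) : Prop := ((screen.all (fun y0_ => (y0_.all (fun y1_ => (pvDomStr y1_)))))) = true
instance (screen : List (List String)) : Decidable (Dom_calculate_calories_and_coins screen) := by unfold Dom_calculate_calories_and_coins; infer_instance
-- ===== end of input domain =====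

-- B replaces A's top-down per-column index state machine by a bottom-up row-major sweep
-- with per-column counting/run-length state (objective: alternative, same asymptotic cost).

-- ===== PORT A =====
-- A's inner loop body, one row: state (max_coin_height, ring_hurdle_height, jump_height)
def pvStepA (g : Int → String) (st : Int × Int × Int) (row : Int) : Int × Int × Int :=
  if g row = "C" then (max st.1 row, st.2.1, st.2.2)
  else if g row = "H" then
    if st.2.1 = -1 then (st.1, row, st.2.2)
    else (st.1, row, max st.2.2 (row - st.2.1 - 1))
  else st

def calculate_calories_and_coins (screen : List (List String)) : Int × Int :=
  let M : Int := (screen.length : Int)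
  let N : Int := (((PySem.List.pyGet? screen 0).getD []).length : Int)
  (PySem.List.pyRange 0 N 1).foldl (fun (acc : Int × Int) col =>
      let cell : Int → String := fun row =>
        (PySem.List.pyGet? ((PySem.List.pyGet? screen row).getD []) col).getD ""
      let st := (PySem.List.pyRange 0 M 1).foldl (pvStepA cell) (-1, -1, 0)
      (acc.1 + st.1 + 1, acc.2 + 2 * st.2.2))
    (0, 0)

-- ===== PORT B =====
-- Source B's step(x, st): st = (sc, cnt, sh, run, best)
def pvStepB (x : String) (st : Bool × Int × Bool × Int × Int) : Bool × Int × Bool × Int × Int :=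
  let sc := st.1 || (x == "C")
  let cnt := st.2.1 + (if sc then 1 else 0)
  if x == "H" then
    (sc, cnt, true, 0, if st.2.2.1 then max st.2.2.2.2 st.2.2.2.1 else st.2.2.2.2)
  else
    (sc, cnt, st.2.2.1, st.2.2.2.1 + 1, st.2.2.2.2)

def calculate_calories_and_coins_alt (screen : List (List String)) : Int × Int :=
  let states0 : List (Bool × Int × Bool × Int × Int) :=
    List.replicate ((PySem.List.pyGet? screen 0).getD []).length (false, 0, false, 0, 0)
  let states := screen.reverse.foldl
    (fun sts row => (row.zip sts).map (fun p => pvStepB p.1 p.2)) states0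
  ((states.map (fun st => st.2.1)).sum, 2 * (states.map (fun st => st.2.2.2.2)).sum)

-- ===== PRECONDITION & SPEC =====
-- Pre_ excludes exactly the inputs where Python A raises IndexError: the empty screen
-- (screen[0]) and ragged screens whose later rows are shorter than the first row.
def Pre_calculate_calories_and_coins (screen : List (List String)) : Prop :=
  screen ≠ [] ∧ ∀ r ∈ screen, (screen.headI).length ≤ r.length
instance (screen : List (List String)) : Decidable (Pre_calculate_calories_and_coins screen) := by
  unfold Pre_calculate_calories_and_coins; infer_instance
def pvWitness_calculate_calories_and_coins : List (List String) := [["C"], ["H"]]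

def Spec_calculate_calories_and_coins (screen : List (List String)) (out : Int × Int) : Prop := out = calculate_calories_and_coins_alt screen
instance (screen : List (List String)) (out : Int × Int) : Decidable (Spec_calculate_calories_and_coins screen out) := by unfold Spec_calculate_calories_and_coins; infer_instance

-- ===== CLAIM (what is proved, stated in full; the proofs are below) =====
def Claim_equal_calculate_calories_and_coins : Prop := ∀ (screen : List (List String)), Dom_calculate_calories_and_coins screen → Pre_calculate_calories_and_coins screen → Spec_calculate_calories_and_coins screen (calculate_calories_and_coins screen)

-- ===== LEMMAS AND PROOFS =====

-- index of last "C" plus one (0 when no "C"): the common per-column coin value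
def pvCSpec : List String → Int
  | [] => 0
  | x :: t => if "C" ∈ t then 1 + pvCSpec t else if x = "C" then 1 else 0

-- length of the prefix before the first "H" (the whole length when no "H")
def pvRSpec : List String → Int
  | [] => 0
  | x :: t => if x = "H" then 0 else pvRSpec t + 1

-- best gap given an open gap of length d since the previous "H"
def pvBYes : Int → List String → Int
  | _, [] => 0
  | d, x :: t => if x = "H" then max d (pvBYes 0 t) else pvBYes (d + 1) t

-- best gap when no "H" has been seen yet: the common per-column jump value
def pvBNo : List String → Int
  | [] => 0
  | x :: t => if x = "H" then pvBYes 0 t else pvBNo t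

-- A's per-column step, reshaped onto (index, value) pairs
def pvStepMC (mc : Int) (p : Int × String) : Int :=
  if p.2 = "C" then max mc p.1 else mc

def pvStepHJ (st : Int × Int) (p : Int × String) : Int × Int :=
  if p.2 = "C" then st
  else if p.2 = "H" then
    if st.1 = -1 then (p.1, st.2) else (p.1, max st.2 (p.1 - st.1 - 1))
  else st

theorem pvCSpec_zero (xs : List String) (h : "C" ∉ xs) : pvCSpec xs = 0 := by
  induction xs with
  | nil => rfl
  | cons x t ih =>
    simp only [List.mem_cons, not_or] at h
    simp only [pvCSpec]
    rw [if_neg h.2, if_neg (fun hx : x = "C" => h.1 hx.symm)]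

theorem pvBNo_zero (xs : List String) (h : "H" ∉ xs) : pvBNo xs = 0 := by
  induction xs with
  | nil => rfl
  | cons x t ih =>
    simp only [List.mem_cons, not_or] at h
    simp only [pvBNo]
    rw [if_neg (fun hx : x = "H" => h.1 hx.symm)]
    exact ih h.2

theorem pvRSpec_nonneg (xs : List String) : 0 ≤ pvRSpec xs := by
  induction xs with
  | nil => simp [pvRSpec]
  | cons x t ih =>
    by_cases hx : x = "H"
    · simp [pvRSpec, hx]
    · simp only [pvRSpec, if_neg hx]
      omega

theorem pvBYes_char (xs : List String) (d : Int) :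
    pvBYes d xs = if "H" ∈ xs then max (d + pvRSpec xs) (pvBNo xs) else 0 := by
  induction xs generalizing d with
  | nil => simp [pvBYes]
  | cons x t ih =>
    by_cases hx : x = "H"
    · subst hx
      simp [pvBYes, pvRSpec, pvBNo]
    · have hxm : ("H" ∈ x :: t) ↔ ("H" ∈ t) := by
        simp only [List.mem_cons, or_iff_right_iff_imp]
        exact fun hh => absurd hh.symm hx
      rw [show pvBYes d (x :: t) = pvBYes (d + 1) t from by simp [pvBYes, hx], ih (d + 1)]
      by_cases ht : "H" ∈ t
      · rw [if_pos ht, if_pos (hxm.mpr ht),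
            show pvRSpec (x :: t) = pvRSpec t + 1 from by simp [pvRSpec, hx],
            show pvBNo (x :: t) = pvBNo t from by simp [pvBNo, hx],
            show d + 1 + pvRSpec t = d + (pvRSpec t + 1) from by ring]
      · rw [if_neg ht, if_neg (fun hm => ht (hxm.mp hm))]

theorem pvBNo_nonneg (xs : List String) : 0 ≤ pvBNo xs := by
  induction xs with
  | nil => simp [pvBNo]
  | cons x t ih =>
    by_cases hx : x = "H"
    · rw [pvBNo, if_pos hx, pvBYes_char]
      split_ifs with ht
      · have h1 := pvRSpec_nonneg t
        have h2 := le_max_left ((0:Int) + pvRSpec t) (pvBNo t)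
        omega
      · omega
    · rw [pvBNo, if_neg hx]; exact ih

-- A's index fold over range(M) is the fold of the pair machine over enumerate
theorem pvFoldEnum {S : Type} (F : S → Int × String → S) (xs : List String) :
    ∀ (s : Int) (init : S),
    (PySem.List.pyRange s (s + (xs.length : Int)) 1).foldl
        (fun st r => F st (r, PySem.List.pyGetD xs (r - s) "")) init
      = (PySem.List.enumerate xs s).foldl F init := by
  induction xs with
  | nil =>
    intro s init
    rw [show s + (([] : List String).length : Int) = s from by simp,
        PySem.List.pyRange_one_eq_nil le_rfl]
    simp [PySem.List.enumerate]
  | cons x t ih =>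
    intro s init
    have hlen : s + ((x :: t).length : Int) = (s + 1) + (t.length : Int) := by
      simp [List.length_cons]; omega
    rw [hlen, PySem.List.pyRange_one_cons (by omega : s < (s + 1) + (t.length : Int)),
        PySem.List.enumerate_cons]
    simp only [List.foldl_cons, sub_self]
    have hx0 : PySem.List.pyGetD (x :: t) 0 "" = x := PySem.List.pyGetD_zero_cons x t ""
    rw [hx0]
    rw [PySem.List.foldl_congr_mem _ _
        (fun st r => F st (r, PySem.List.pyGetD t (r - (s + 1)) "")) _
        (fun acc r hr => by
          have hb := PySem.List.mem_pyRange_one.mp hr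
          have h1 : (1:Int) ≤ r - s := by omega
          have : PySem.List.pyGetD (x :: t) (r - s) "" = PySem.List.pyGetD t (r - (s + 1)) "" := by
            have hnat : r - s = ((r - s).toNat : Int) := by omega
            have hnat2 : r - (s + 1) = ((r - (s + 1)).toNat : Int) := by omega
            rw [hnat, hnat2, PySem.List.pyGetD_natCast, PySem.List.pyGetD_natCast]
            have hsucc : (r - s).toNat = (r - (s + 1)).toNat + 1 := by omega
            rw [hsucc]
            rfl
          rw [this])]
    exact ih (s + 1) (F init (s, x))

-- A's step is the product of the MC and HJ components on the (index, value) pair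
def pvStepAE (st : Int × Int × Int) (p : Int × String) : Int × Int × Int :=
  (pvStepMC st.1 p, pvStepHJ st.2 p)

theorem pvStepA_eq (g : Int → String) (st : Int × Int × Int) (row : Int) :
    pvStepA g st row = pvStepAE st (row, g row) := by
  unfold pvStepA pvStepAE pvStepMC pvStepHJ
  by_cases hc : g row = "C"
  · simp [hc]
  · by_cases hh : g row = "H" <;> by_cases hs : st.2.1 = -1 <;> simp [hc, hh, hs]

theorem pvMC_char (xs : List String) :
    ∀ (s mc : Int), mc + 1 ≤ s →
    (PySem.List.enumerate xs s).foldl pvStepMC mc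
      = if "C" ∈ xs then s + pvCSpec xs - 1 else mc := by
  induction xs with
  | nil => intro s mc h; simp [PySem.List.enumerate]
  | cons x t ih =>
    intro s mc h
    rw [PySem.List.enumerate_cons, List.foldl_cons]
    have hstep : pvStepMC mc (s, x) = if x = "C" then s else mc := by
      unfold pvStepMC; split_ifs with hx <;> simp_all <;> omega
    rw [hstep]
    have hih := ih (s + 1) (if x = "C" then s else mc)
      (by split_ifs <;> omega)
    rw [hih]
    by_cases ht : "C" ∈ t
    · rw [if_pos ht, if_pos (List.mem_cons_of_mem x ht)]
      rw [show pvCSpec (x :: t) = 1 + pvCSpec t from by rw [pvCSpec, if_pos ht]]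
      omega
    · by_cases hx : x = "C"
      · rw [if_neg ht, if_pos hx, if_pos (by rw [← hx]; exact List.mem_cons_self)]
        rw [show pvCSpec (x :: t) = 1 from by rw [pvCSpec, if_neg ht, if_pos hx]]
        omega
      · rw [if_neg ht, if_neg hx,
            if_neg (by simp only [List.mem_cons]; rintro (hh | hh); exact hx hh.symm; exact ht hh)]

theorem pvHJ_char (xs : List String) :
    ∀ (s rh j : Int), 0 ≤ j → -1 ≤ rh → rh < s →
    ((PySem.List.enumerate xs s).foldl pvStepHJ (rh, j)).2
      = if rh = -1 then max j (pvBNo xs) else max j (pvBYes (s - rh - 1) xs) := by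
  induction xs with
  | nil =>
    intro s rh j hj hm1 hrh
    simp only [PySem.List.enumerate, List.foldl_nil, pvBNo, pvBYes]
    split_ifs <;> omega
  | cons x t ih =>
    intro s rh j hj hm1 hrh
    rw [PySem.List.enumerate_cons, List.foldl_cons]
    by_cases hc : x = "C"
    · have : pvStepHJ (rh, j) (s, x) = (rh, j) := by unfold pvStepHJ; simp [hc]
      rw [this, ih (s + 1) rh j hj hm1 (by omega)]
      have hbn : pvBNo (x :: t) = pvBNo t := by
        rw [pvBNo, if_neg (by simp [hc])]
      have hby : pvBYes (s - rh - 1) (x :: t) = pvBYes (s - rh - 1 + 1) t := by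
        rw [pvBYes, if_neg (by simp [hc])]
      rw [hbn, hby]
      have : s + 1 - rh - 1 = s - rh - 1 + 1 := by omega
      rw [this]
    · by_cases hh : x = "H"
      · by_cases hs : rh = -1
        · have : pvStepHJ (rh, j) (s, x) = (s, j) := by unfold pvStepHJ; simp [hh, hs]
          rw [this, ih (s + 1) s j hj (by omega) (by omega)]
          have hne : ¬ s = -1 := by omega
          rw [if_neg hne, if_pos hs]
          have : s + 1 - s - 1 = 0 := by omega
          rw [this, pvBNo, if_pos hh]
        · have : pvStepHJ (rh, j) (s, x) = (s, max j (s - rh - 1)) := by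
            unfold pvStepHJ; simp [hh, hs]
          rw [this, ih (s + 1) s (max j (s - rh - 1)) (le_max_of_le_left hj) (by omega) (by omega)]
          have hne : ¬ s = -1 := by omega
          rw [if_neg hne, if_neg hs]
          have h0 : s + 1 - s - 1 = 0 := by omega
          rw [h0, pvBYes, if_pos hh]
          have hmax : max (max j (s - rh - 1)) (pvBYes 0 t) = max j (max (s - rh - 1) (pvBYes 0 t)) :=
            max_assoc j (s - rh - 1) (pvBYes 0 t)
          rw [hmax]
      · have : pvStepHJ (rh, j) (s, x) = (rh, j) := by unfold pvStepHJ; simp [hc, hh]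
        rw [this, ih (s + 1) rh j hj hm1 (by omega)]
        have hbn : pvBNo (x :: t) = pvBNo t := by rw [pvBNo, if_neg hh]
        have hby : pvBYes (s - rh - 1) (x :: t) = pvBYes (s - rh - 1 + 1) t := by
          rw [pvBYes, if_neg hh]
        rw [hbn, hby]
        have : s + 1 - rh - 1 = s - rh - 1 + 1 := by omega
        rw [this]

-- B's per-column bottom-up machine computes exactly the spec components
theorem pvB_char (xs : List String) :
    xs.foldr pvStepB (false, 0, false, 0, 0)
      = (decide ("C" ∈ xs), pvCSpec xs, decide ("H" ∈ xs), pvRSpec xs, pvBNo xs) := by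
  induction xs with
  | nil => simp [pvCSpec, pvRSpec, pvBNo]
  | cons x t ih =>
    rw [List.foldr_cons, ih]
    unfold pvStepB
    have hsc : (decide ("C" ∈ t) || (x == "C")) = decide ("C" ∈ x :: t) := by
      by_cases hx : x = "C"
      · simp [hx, List.mem_cons]
      · have h1 : (x == "C") = false := by simp [hx]
        have h2 : decide ("C" ∈ x :: t) = decide ("C" ∈ t) := by
          simp only [List.mem_cons, decide_eq_decide, or_iff_right_iff_imp]
          exact fun hm : "C" = x => absurd hm.symm hx
        rw [h1, h2, Bool.or_false]
    have hcnt : pvCSpec t + (if (decide ("C" ∈ x :: t)) = true then 1 else 0)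
        = pvCSpec (x :: t) := by
      by_cases ht : "C" ∈ t
      · rw [show pvCSpec (x :: t) = 1 + pvCSpec t from by rw [pvCSpec, if_pos ht]]
        simp only [if_pos (by simp [List.mem_cons, ht] : decide ("C" ∈ x :: t) = true)]
        omega
      · rw [pvCSpec_zero t ht]
        by_cases hx : x = "C"
        · rw [show pvCSpec (x :: t) = 1 from by rw [pvCSpec, if_neg ht, if_pos hx]]
          simp [hx]
        · rw [show pvCSpec (x :: t) = 0 from by rw [pvCSpec, if_neg ht, if_neg hx]]
          have hf : decide ("C" ∈ x :: t) = false := by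
            simp only [List.mem_cons, decide_eq_false_iff_not, not_or]
            exact ⟨fun hm => hx hm.symm, ht⟩
          rw [hf]
          simp
    by_cases hh : x = "H"
    · rw [if_pos (by simp [hh])]
      simp only [hsc, hcnt, Prod.mk.injEq]
      refine ⟨trivial, trivial, ?_, ?_, ?_⟩
      · simp [hh]
      · rw [pvRSpec, if_pos hh]
      · rw [show pvBNo (x :: t) = pvBYes 0 t from by rw [pvBNo, if_pos hh], pvBYes_char]
        by_cases ht : "H" ∈ t
        · simp only [ht, decide_true, if_true, zero_add]
          rw [max_comm]
        · simp [ht, pvBNo_zero t ht]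
    · rw [if_neg (by simp [hh])]
      simp only [hsc, hcnt, Prod.mk.injEq]
      refine ⟨trivial, trivial, ?_, ?_, ?_⟩
      · simp only [List.mem_cons, decide_eq_decide]
        exact Iff.symm (or_iff_right_iff_imp.mpr (fun hm : "H" = x => absurd hm.symm hh))
      · rw [pvRSpec, if_neg hh]
      · rw [pvBNo, if_neg hh]

-- B's row sweep acts on the columns independently
theorem pvParFold (rs : List (List String)) :
    ∀ (sts : List (Bool × Int × Bool × Int × Int)),
    (∀ row ∈ rs, sts.length ≤ row.length) →
    rs.foldl (fun sts row => (row.zip sts).map (fun p => pvStepB p.1 p.2)) sts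
      = (List.range sts.length).map (fun c =>
          (rs.map (fun row => row.getD c "")).foldl (fun st x => pvStepB x st)
            (sts.getD c (false, 0, false, 0, 0))) := by
  induction rs with
  | nil =>
    intro sts _
    simp only [List.foldl_nil, List.map_nil]
    refine (List.ext_getElem (by simp) ?_).symm
    intro i h1 h2
    simp [List.getD_eq_getElem?_getD, List.getElem?_eq_getElem (by simpa using h2)]
  | cons row rs ih =>
    intro sts hlen
    have hrow : sts.length ≤ row.length := hlen row List.mem_cons_self
    have hzl : ((row.zip sts).map (fun p => pvStepB p.1 p.2)).length = sts.length := by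
      simp [List.length_zip]; omega
    rw [List.foldl_cons, ih _ (by rw [hzl]; exact fun r hr => hlen r (List.mem_cons_of_mem _ hr)),
        hzl]
    refine List.map_congr_left ?_
    intro c hc
    have hcl : c < sts.length := List.mem_range.mp hc
    have hcr : c < row.length := lt_of_lt_of_le hcl hrow
    have hstart : ((row.zip sts).map (fun p => pvStepB p.1 p.2)).getD c (false, 0, false, 0, 0)
        = pvStepB (row.getD c "") (sts.getD c (false, 0, false, 0, 0)) := by
      rw [List.getD_eq_getElem _ _ (by rw [hzl]; exact hcl),
          List.getElem_map, List.getElem_zip,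
          List.getD_eq_getElem _ _ hcr, List.getD_eq_getElem _ _ hcl]
    rw [hstart, List.map_cons, List.foldl_cons]

-- a fold accumulating two running sums is the pair of the mapped sums
theorem pvPairSum {α : Type} (l : List α) (F G : α → Int) :
    ∀ (a b : Int),
    l.foldl (fun acc x => (acc.1 + F x, acc.2 + G x)) (a, b)
      = (a + (l.map F).sum, b + (l.map G).sum) := by
  induction l with
  | nil => intro a b; simp
  | cons x t ih =>
    intro a b
    rw [List.foldl_cons, ih, List.map_cons, List.map_cons, List.sum_cons, List.sum_cons]
    simp [add_assoc]

-- A's per-column fold, evaluated against the column list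
theorem pvAcol (screen : List (List String)) (k : Nat) :
    ((PySem.List.pyRange 0 ((screen.length : Int)) 1).foldl
        (pvStepA (fun row =>
          (PySem.List.pyGet? ((PySem.List.pyGet? screen row).getD [])
            ((k : Nat) : Int)).getD "")) (-1, -1, 0)).1 + 1
        = pvCSpec (screen.map (fun row => row.getD k "")) ∧
    ((PySem.List.pyRange 0 ((screen.length : Int)) 1).foldl
        (pvStepA (fun row =>
          (PySem.List.pyGet? ((PySem.List.pyGet? screen row).getD [])
            ((k : Nat) : Int)).getD "")) (-1, -1, 0)).2.2
        = pvBNo (screen.map (fun row => row.getD k "")) := by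
  set colB := screen.map (fun row => row.getD k "") with hcol
  have hml : colB.length = screen.length := by simp [hcol]
  have hcongr : ∀ (st : Int × Int × Int), ∀ r ∈ PySem.List.pyRange 0 ((screen.length : Int)) 1,
      pvStepA (fun row =>
          (PySem.List.pyGet? ((PySem.List.pyGet? screen row).getD [])
            ((k : Nat) : Int)).getD "") st r
        = pvStepAE st (r, PySem.List.pyGetD colB (r - 0) "") := by
    intro st r hr
    obtain ⟨hr0, hrM⟩ := PySem.List.mem_pyRange_one.mp hr
    rw [pvStepA_eq]
    refine congrArg (pvStepAE st) (congrArg (Prod.mk r) ?_)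
    rw [sub_zero]
    have hrow : (PySem.List.pyGet? screen r).getD [] = screen[r.toNat] :=
      PySem.List.pyGetD_eq_getElem screen [] hr0 hrM
    rw [hrow]
    have hcell : (PySem.List.pyGet? screen[r.toNat] ((k : Nat) : Int)).getD ""
        = screen[r.toNat].getD k "" := PySem.List.pyGetD_natCast screen[r.toNat] k ""
    rw [hcell]
    have hlt : r < (colB.length : Int) := by rw [hml]; exact hrM
    rw [show PySem.List.pyGetD colB r "" = colB[r.toNat] from
        PySem.List.pyGetD_eq_getElem colB "" hr0 hlt]
    simp [hcol]
  rw [PySem.List.foldl_congr_mem _ _ _ _ hcongr,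
      show ((screen.length : Int)) = 0 + (colB.length : Int) from by rw [hml]; ring,
      pvFoldEnum pvStepAE colB 0 (-1, -1, 0),
      show (PySem.List.enumerate colB 0).foldl pvStepAE ((-1 : Int), (-1 : Int), (0 : Int))
          = ((PySem.List.enumerate colB 0).foldl pvStepMC (-1),
             (PySem.List.enumerate colB 0).foldl pvStepHJ (-1, 0)) from
        PySem.List.foldl_prod_mk _ _ _ _ _,
      pvMC_char colB 0 (-1) (by omega)]
  have hhj := pvHJ_char colB 0 (-1) 0 le_rfl le_rfl (by omega)
  rw [if_pos rfl] at hhj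
  constructor
  · show (if "C" ∈ colB then 0 + pvCSpec colB - 1 else -1) + 1 = pvCSpec colB
    by_cases hC : "C" ∈ colB
    · rw [if_pos hC]; ring
    · rw [if_neg hC, pvCSpec_zero colB hC]; ring
  · show ((PySem.List.enumerate colB 0).foldl pvStepHJ (-1, 0)).2 = pvBNo colB
    rw [hhj, max_eq_right (pvBNo_nonneg colB)]

-- ===== VERDICT (by name: the statement is the Claim_ definition above) =====
theorem calculate_calories_and_coins_spec : Claim_equal_calculate_calories_and_coins := by
  intro screen _ hpre
  obtain ⟨hne, hrows⟩ := hpre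
  cases screen with
  | nil => exact absurd rfl hne
  | cons r0 rest =>
    unfold Spec_calculate_calories_and_coins calculate_calories_and_coins
      calculate_calories_and_coins_alt
    have hN : (PySem.List.pyGet? (r0 :: rest) 0).getD ([] : List String) = r0 :=
      PySem.List.pyGetD_zero_cons r0 rest []
    rw [hN]
    simp only []
    -- A side: range over columns as a Nat range
    rw [PySem.List.pyRange_zero_nat r0.length, List.foldl_map]
    have hApercol : ∀ (acc : Int × Int), ∀ c ∈ List.range r0.length,
        (fun (acc : Int × Int) (col : Int) =>
          (acc.1 + ((PySem.List.pyRange 0 (((r0 :: rest).length : Int)) 1).foldl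
              (pvStepA (fun row =>
                (PySem.List.pyGet? ((PySem.List.pyGet? (r0 :: rest) row).getD []) col).getD ""))
              (-1, -1, 0)).1 + 1,
           acc.2 + 2 * ((PySem.List.pyRange 0 (((r0 :: rest).length : Int)) 1).foldl
              (pvStepA (fun row =>
                (PySem.List.pyGet? ((PySem.List.pyGet? (r0 :: rest) row).getD []) col).getD ""))
              (-1, -1, 0)).2.2)) acc ((c : Nat) : Int)
          = (acc.1 + pvCSpec ((r0 :: rest).map (fun row => row.getD c "")),
             acc.2 + 2 * pvBNo ((r0 :: rest).map (fun row => row.getD c ""))) := by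
      intro acc c _
      obtain ⟨h1, h2⟩ := pvAcol (r0 :: rest) c
      rw [Prod.mk.injEq]
      constructor
      · rw [← h1]; ring
      · rw [← h2]
    rw [PySem.List.foldl_congr_mem _ _
        (fun (acc : Int × Int) (c : Nat) =>
          (acc.1 + pvCSpec ((r0 :: rest).map (fun row => row.getD c "")),
           acc.2 + 2 * pvBNo ((r0 :: rest).map (fun row => row.getD c ""))))
        _ hApercol,
        pvPairSum]
    -- B side
    have hlenrep : (List.replicate r0.length
        ((false, 0, false, 0, 0) : Bool × Int × Bool × Int × Int)).length = r0.length :=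
      List.length_replicate
    have hpar := pvParFold (r0 :: rest).reverse
      (List.replicate r0.length (false, 0, false, 0, 0))
      (by
        intro row hrow
        rw [hlenrep]
        have := hrows row (List.mem_reverse.mp hrow)
        simpa using this)
    rw [hpar, hlenrep]
    have hstates : ∀ c ∈ List.range r0.length,
        ((r0 :: rest).reverse.map (fun row => row.getD c "")).foldl
            (fun st x => pvStepB x st)
            ((List.replicate r0.length
              ((false, 0, false, 0, 0) : Bool × Int × Bool × Int × Int)).getD c
              (false, 0, false, 0, 0))
          = (decide ("C" ∈ (r0 :: rest).map (fun row => row.getD c "")),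
             pvCSpec ((r0 :: rest).map (fun row => row.getD c "")),
             decide ("H" ∈ (r0 :: rest).map (fun row => row.getD c "")),
             pvRSpec ((r0 :: rest).map (fun row => row.getD c "")),
             pvBNo ((r0 :: rest).map (fun row => row.getD c ""))) := by
      intro c hc
      rw [List.getD_replicate _ (List.mem_range.mp hc),
          List.map_reverse, List.foldl_reverse, pvB_char]
    rw [List.map_congr_left hstates, List.map_map, List.map_map]
    simp only [Function.comp_def]
    rw [Prod.mk.injEq]
    constructor
    · ring
    · rw [List.sum_map_mul_left]
      ring
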